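-- pv_equiv track=rewrite | github.com/SJTUwxz/LoCoNet_ASD | videoloaders/transform_temporal.py | temporal_batching_index
-- ===== SOURCE A (Python) =====
-- def temporal_batching_index(fr,length=16):
--     '''
--     Do padding or half-overlapping clips for video.
--
--     Input:
--         fr: number of frames
--     Output:
--         batch_indices: array for batch where each element is frame index
--     '''
--     if fr < length:
--         #e.g. (1,2,3,4,5) to (1,1,....,1,2,3,4,5,5,...,5,5)
--         right = int((length-fr)/2)
--         left = length - right - fr
--         return [[0]*left + list(range(fr)) + [fr-1]*right]
--
--     batch_indices = []
--     last_idx = fr - 1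
--     assert length%2 == 0
--     half = int(length/2)
--     for i in range(0,fr-half,half):
--             frame_indices = [0,]*length
--             for j in range(length):
--                 current_idx =  i + j
--                 if current_idx < last_idx:
--                     frame_indices[j] = current_idx
--                 else:
--                     frame_indices[j] = last_idx
--             batch_indices.append(frame_indices)
--
--     return batch_indices
-- ===== SOURCE B (Python) =====
-- def temporal_batching_index(fr, length=16):
--     # B: precompute one flat padded index table and slice clips out of it
--     if fr < length:
--         right = int((length - fr) / 2)
--         left = length - right - fr
--         return [[0] * left + list(range(fr)) + [fr - 1] * right]
--     assert length % 2 == 0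
--     half = int(length / 2)
--     starts = range(0, fr - half, half)
--     if not starts:
--         return []
--     all_idx = list(range(fr)) + [fr - 1] * length
--     return [all_idx[i:i + length] for i in starts]
-- ===== Notes on version B (the rewrite author's own statement) =====
-- stated objective: simpler
-- what changed: B precomputes one flat padded index table (range(fr) plus length copies of fr-1) and emits each clip as a plain slice of it, replacing A's inner per-frame loop with explicit min/clamp branching; the fr<length padding branch is kept.
import Mathlib
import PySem

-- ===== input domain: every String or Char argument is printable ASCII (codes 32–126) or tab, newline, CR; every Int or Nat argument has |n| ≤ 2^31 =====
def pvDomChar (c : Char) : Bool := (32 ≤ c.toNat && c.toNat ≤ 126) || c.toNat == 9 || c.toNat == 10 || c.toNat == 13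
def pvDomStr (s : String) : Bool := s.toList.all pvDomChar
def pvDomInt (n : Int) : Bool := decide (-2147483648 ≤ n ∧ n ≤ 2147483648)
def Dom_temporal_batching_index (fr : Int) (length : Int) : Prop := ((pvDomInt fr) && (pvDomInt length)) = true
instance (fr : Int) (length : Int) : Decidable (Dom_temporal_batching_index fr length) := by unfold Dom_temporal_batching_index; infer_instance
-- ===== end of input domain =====

-- B replaces A's inner per-element clamping loop by one precomputed padded index
-- table sliced per clip (objective: simpler; same asymptotic cost).

-- ===== PORT A =====
def temporal_batching_index (fr : Int) (length : Int) : List (List Int) :=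
  if fr < length then
    let right := PySem.Int.truncdiv (length - fr) 2   -- int((length-fr)/2)
    let left := length - right - fr
    [List.replicate left.toNat (0 : Int) ++ PySem.List.pyRange 0 fr 1 ++ List.replicate right.toNat (fr - 1)]
  else
    -- assert length % 2 == 0  (an odd length raises here: excluded by Pre_)
    let last_idx := fr - 1
    let half := PySem.Int.truncdiv length 2           -- int(length/2)
    (PySem.List.pyRange 0 (fr - half) half).foldl
      (fun batch_indices i =>
        let fi0 := List.replicate length.toNat (0 : Int)    -- [0,]*length
        let fi := (PySem.List.pyRange 0 length 1).foldl
          (fun frame_indices j =>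
            let current_idx := i + j
            frame_indices.set j.toNat
              (if current_idx < last_idx then current_idx else last_idx)) fi0
        batch_indices ++ [fi]) []

-- ===== PORT B =====
def temporal_batching_index_alt (fr : Int) (length : Int) : List (List Int) :=
  if fr < length then
    let right := PySem.Int.truncdiv (length - fr) 2
    let left := length - right - fr
    [List.replicate left.toNat (0 : Int) ++ PySem.List.pyRange 0 fr 1 ++ List.replicate right.toNat (fr - 1)]
  else
    let half := PySem.Int.truncdiv length 2
    let starts := PySem.List.pyRange 0 (fr - half) half
    if starts = [] then []
    else
      let all_idx := PySem.List.pyRange 0 fr 1 ++ List.replicate length.toNat (fr - 1)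
      starts.map (fun i => PySem.List.slice all_idx (some i) (some (i + length)))

-- ===== PRECONDITION & SPEC =====
-- Exactly the inputs on which Python A returns: with fr ≥ length, an odd length
-- fails the assert (AssertionError) and length = 0 makes range's step 0 (ValueError).
def Pre_temporal_batching_index (fr : Int) (length : Int) : Prop :=
  fr < length ∨ (length ≠ 0 ∧ length % 2 = 0)
instance (fr : Int) (length : Int) : Decidable (Pre_temporal_batching_index fr length) := by
  unfold Pre_temporal_batching_index; infer_instance
def pvWitness_temporal_batching_index : Int × Int := (20, 4)

def Spec_temporal_batching_index (fr : Int) (length : Int) (out : List (List Int)) : Prop := out = temporal_batching_index_alt fr length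
instance (fr : Int) (length : Int) (out : List (List Int)) : Decidable (Spec_temporal_batching_index fr length out) := by unfold Spec_temporal_batching_index; infer_instance

-- ===== CLAIM (what is proved, stated in full; the proofs are below) =====
def Claim_equal_temporal_batching_index : Prop := ∀ (fr : Int) (length : Int), Dom_temporal_batching_index fr length → Pre_temporal_batching_index fr length → Spec_temporal_batching_index fr length (temporal_batching_index fr length)

-- ===== LEMMAS AND PROOFS =====

-- a negative-step range whose stop is not below its start is empty
theorem pyRange_nil_of_neg (a b s : Int) (hs : s < 0) (hab : a ≤ b) :
    PySem.List.pyRange a b s = [] := by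
  simp only [PySem.List.pyRange]
  rw [if_neg (by omega : ¬ s = 0), if_neg (by omega : ¬ 0 < s), if_neg (by omega : ¬ b < a)]
  simp

theorem slice_nil (a b : Int) : PySem.List.slice ([] : List Int) (some a) (some b) = [] := by
  simp [PySem.List.slice]

-- writing g j into slot j for every j in range n fills a long-enough list with g
theorem setfold_range (g : Int → Int) :
    ∀ (n : Nat) (l : List Int), n ≤ l.length →
      (List.range n).foldl (fun fi k => fi.set k (g k)) l
        = (List.range n).map (fun (k : Nat) => g (k : Int)) ++ l.drop n := by
  intro n
  induction n with
  | zero => intro l _; simp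
  | succ n ih =>
    intro l hl
    rw [List.range_succ, List.foldl_append, List.foldl_cons, List.foldl_nil, ih l (by omega)]
    have hd : l.drop n = l[n] :: l.drop (n + 1) :=
      List.drop_eq_getElem_cons (by omega : n < l.length)
    rw [hd, List.map_append, List.set_append_right _ _ (by simp)]
    simp only [List.length_map, List.length_range, Nat.sub_self, List.set_cons_zero,
      List.map_cons, List.map_nil, List.append_assoc, List.cons_append, List.nil_append]

-- A's inner loop builds exactly the j ↦ clamp(i+j) table
theorem clipA_eq_map (fr length i : Int) :
    (PySem.List.pyRange 0 length 1).foldl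
      (fun frame_indices j =>
        frame_indices.set j.toNat
          (if i + j < fr - 1 then i + j else fr - 1))
      (List.replicate length.toNat (0 : Int))
    = (List.range length.toNat).map
        (fun (k : Nat) => if i + (k : Int) < fr - 1 then i + (k : Int) else fr - 1) := by
  rw [PySem.List.pyRange_one, List.foldl_map]
  have := setfold_range (fun j => if i + j < fr - 1 then i + j else fr - 1)
      length.toNat (List.replicate length.toNat (0 : Int)) (by simp)
  simp only [zero_add, Int.toNat_natCast] at this ⊢
  simp [this]

-- B's slice of the padded table is the same clamp table
theorem clipB_eq_map (fr length i : Int) (h2 : 2 ≤ length) (hfr : length ≤ fr)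
    (hi0 : 0 ≤ i) (hi1 : i < fr) :
    PySem.List.slice
        (PySem.List.pyRange 0 fr 1 ++ List.replicate length.toNat (fr - 1))
        (some i) (some (i + length))
    = (List.range length.toNat).map
        (fun (k : Nat) => if i + (k : Int) < fr - 1 then i + (k : Int) else fr - 1) := by
  rw [PySem.List.slice_toNat _ hi0 (by omega)]
  apply List.ext_getElem
  · simp [PySem.List.length_pyRange_one]
    omega
  · intro k hk1 hk2
    simp only [List.getElem_take, List.getElem_drop, List.getElem_map, List.getElem_range]
    have hklt : (k : Int) < length := by
      simp at hk2; omega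
    have hidx : i.toNat + k < (PySem.List.pyRange 0 fr 1 ++ List.replicate length.toNat (fr - 1)).length := by
      simp [PySem.List.length_pyRange_one]; omega
    by_cases hc : i + (k : Int) < fr - 1
    · have hlt : i.toNat + k < (PySem.List.pyRange 0 fr 1).length := by
        simp [PySem.List.length_pyRange_one]; omega
      rw [List.getElem_append_left hlt, PySem.List.getElem_pyRange_one]
      simp [hc]; omega
    · by_cases hc2 : i + (k : Int) < fr
      · have hlt : i.toNat + k < (PySem.List.pyRange 0 fr 1).length := by
          simp [PySem.List.length_pyRange_one]; omega
        rw [List.getElem_append_left hlt, PySem.List.getElem_pyRange_one]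
        simp [hc]; omega
      · have hge : (PySem.List.pyRange 0 fr 1).length ≤ i.toNat + k := by
          simp [PySem.List.length_pyRange_one]; omega
        rw [List.getElem_append_right hge]
        simp [hc]

-- ===== VERDICT (by name: the statement is the Claim_ definition above) =====
theorem temporal_batching_index_spec : Claim_equal_temporal_batching_index := by
  intro fr length _ hpre
  unfold Spec_temporal_batching_index temporal_batching_index temporal_batching_index_alt
  by_cases hlt : fr < length
  · simp [hlt]
  · simp only [hlt]
    rcases hpre with h | ⟨hne, heven⟩
    · exact absurd h hlt
    rw [PySem.List.foldl_append_singleton_eq_map, List.nil_append]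
    obtain ⟨m, hm⟩ : (2 : Int) ∣ length := Int.dvd_of_emod_eq_zero heven
    have htd : PySem.Int.truncdiv length 2 = m := by
      simp [PySem.Int.truncdiv, hm, Int.mul_tdiv_cancel_left m (by norm_num : (2:Int) ≠ 0)]
    rw [htd]
    by_cases hs : PySem.List.pyRange 0 (fr - m) m = []
    · rw [hs]
      simp
    · rw [if_neg hs]
      rcases lt_or_ge length 0 with hneg | hpos
      · -- even negative length: a nonempty start range forces fr < 0,
        -- so the padded table is empty and every clip on both sides is []
        have hfr : fr < 0 := by
          by_contra hfr
          exact hs (pyRange_nil_of_neg 0 (fr - m) m (by omega) (by omega))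
        have htbl : PySem.List.pyRange 0 fr 1 ++ List.replicate length.toNat (fr - 1) = [] := by
          rw [PySem.List.pyRange_one_eq_nil (by omega), Int.toNat_of_nonpos (by omega)]
          simp
        apply List.map_congr_left
        intro i _
        rw [PySem.List.pyRange_one_eq_nil (by omega), List.foldl_nil, htbl, slice_nil]
        rw [Int.toNat_of_nonpos (by omega)]
        simp
      · -- even positive length: each clip equals the corresponding slice
        apply List.map_congr_left
        intro i hi
        have hm2 : 0 < m := by omega
        obtain ⟨hi0, hi1, -⟩ := (PySem.List.mem_pyRange_iff_of_pos hm2 i).1 hi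
        rw [clipA_eq_map fr length i,
            clipB_eq_map fr length i (by omega) (by omega) hi0 (by omega)]
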